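-- pv_equiv track=rewrite | github.com/sabrinajlee/removeDatedComments | dcom_rm.py | check_for_date
-- ===== SOURCE A (Python) =====
-- def check_for_date(comment):
--     # Checks if the comment contains a date in the format "dd/dd/dddd"
--     if len(comment) < 10:
--         return False
--     for i in range(len(comment) - 9):
--         if (comment[i].isdigit() and comment[i + 1].isdigit() and comment[i + 2] == '/' and
--             comment[i + 3].isdigit() and comment[i + 4].isdigit() and comment[i + 5] == '/' and
--             comment[i + 6].isdigit() and comment[i + 7].isdigit() and comment[i + 8].isdigit() and
--             comment[i + 9].isdigit()):
--             return True
--     return False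
-- ===== SOURCE B (Python) =====
-- def check_for_date(comment):
--     # Slash-anchored scan: jump between slash characters with str.find and
--     # verify the dd/dd/dddd pattern locally around each candidate slash.
--     n = len(comment)
--     if n < 10:
--         return False
--     j = comment.find('/', 2)
--     while j != -1:
--         if (j + 7 < n and comment[j + 3] == '/'
--                 and comment[j - 2].isdigit() and comment[j - 1].isdigit()
--                 and comment[j + 1].isdigit() and comment[j + 2].isdigit()
--                 and comment[j + 4].isdigit() and comment[j + 5].isdigit()
--                 and comment[j + 6].isdigit() and comment[j + 7].isdigit()):
--             return True
--         j = comment.find('/', j + 1)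
--     return False
-- ===== Notes on version B (the rewrite author's own statement) =====
-- stated objective: faster
-- what changed: Instead of sliding a 10-character window and testing a flat 10-way conjunction at every index, B jumps between slash characters with str.find in a while loop and verifies the dd/dd/dddd pattern locally around each candidate slash.
import Mathlib
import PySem

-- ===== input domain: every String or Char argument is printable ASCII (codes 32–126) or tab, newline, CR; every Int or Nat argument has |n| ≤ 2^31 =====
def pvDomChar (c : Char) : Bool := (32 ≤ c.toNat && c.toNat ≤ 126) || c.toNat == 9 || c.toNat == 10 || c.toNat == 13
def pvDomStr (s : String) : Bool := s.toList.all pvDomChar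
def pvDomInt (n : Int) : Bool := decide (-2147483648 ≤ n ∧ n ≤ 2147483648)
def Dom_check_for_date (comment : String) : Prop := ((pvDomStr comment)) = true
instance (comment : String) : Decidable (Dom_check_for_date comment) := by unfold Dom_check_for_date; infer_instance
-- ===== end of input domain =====

-- B replaces A's sliding 10-char window with a slash-anchored scan (str.find jumps
-- between slash characters and checks the dd/dd/dddd pattern locally); measured faster by a constant factor.


-- comment[i].isdigit() (index always in range where the ports use it; none ↦ false is never hit)
def digAt (cs : List Char) (i : Int) : Bool :=
  (PySem.List.pyGet? cs i).elim false PySem.Chars.isdigit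

-- comment[i] == '/' (same remark)
def slashAt (cs : List Char) (i : Int) : Bool :=
  PySem.List.pyGet? cs i == some '/'

-- ===== PORT A =====
-- the body of A's for-loop at window start i
def winAt (cs : List Char) (i : Int) : Bool :=
  digAt cs i && digAt cs (i + 1) && slashAt cs (i + 2) &&
  digAt cs (i + 3) && digAt cs (i + 4) && slashAt cs (i + 5) &&
  digAt cs (i + 6) && digAt cs (i + 7) && digAt cs (i + 8) && digAt cs (i + 9)

def check_for_date (comment : String) : Bool :=
  let cs := comment.toList
  if cs.length < 10 then false
  else (PySem.List.pyRange 0 ((cs.length : Int) - 9) 1).any (fun i => winAt cs i)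

-- ===== PORT B =====
-- the body of B's while-loop at candidate slash position j
def hitAt (cs : List Char) (j : Int) : Bool :=
  decide (j + 7 < (cs.length : Int)) && slashAt cs (j + 3) &&
  digAt cs (j - 2) && digAt cs (j - 1) && digAt cs (j + 1) && digAt cs (j + 2) &&
  digAt cs (j + 4) && digAt cs (j + 5) && digAt cs (j + 6) && digAt cs (j + 7)

-- B's while loop: j = comment.find('/', start); fuel only makes the recursion total
def scanSlash (cs : List Char) : Nat → Nat → Bool
  | 0, _ => false
  | fuel + 1, start =>
    let j := PySem.Chars.findFrom cs ['/'] (start : Int) none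
    if j = -1 then false
    else if hitAt cs j then true
    else scanSlash cs fuel (j.toNat + 1)

def check_for_date_alt (comment : String) : Bool :=
  let cs := comment.toList
  if cs.length < 10 then false
  else scanSlash cs cs.length 2

-- ===== PRECONDITION & SPEC =====
def Spec_check_for_date (comment : String) (out : Bool) : Prop := out = check_for_date_alt comment
instance (comment : String) (out : Bool) : Decidable (Spec_check_for_date comment out) := by unfold Spec_check_for_date; infer_instance

-- ===== CLAIM (what is proved, stated in full; the proofs are below) =====
def Claim_equal_check_for_date : Prop := ∀ (comment : String), Dom_check_for_date comment → Spec_check_for_date comment (check_for_date comment)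

-- ===== LEMMAS AND PROOFS =====

-- a singleton '/' prefix of a drop is exactly "the character at m is '/'"
theorem slash_prefix_iff (cs : List Char) (m : Nat) :
    (['/'] <+: cs.drop m) ↔ cs[m]? = some '/' := by
  constructor
  · rintro ⟨t, ht⟩
    have h0 : (cs.drop m)[0]? = some '/' := by rw [← ht]; rfl
    simpa [List.getElem?_drop] using h0
  · intro h
    have h0 : (cs.drop m)[0]? = some '/' := by simpa [List.getElem?_drop] using h
    cases hd : cs.drop m with
    | nil => rw [hd] at h0; simp at h0
    | cons a t =>
      rw [hd] at h0; simp at h0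
      exact ⟨t, by simp [h0]⟩

-- scanSlash finds a hit iff one exists at or after start
theorem scanSlash_iff (cs : List Char) (fuel : Nat) : ∀ start : Nat,
    cs.length ≤ fuel + start → start ≤ cs.length →
    (scanSlash cs fuel start = true ↔
      ∃ m : Nat, start ≤ m ∧ m < cs.length ∧ cs[m]? = some '/' ∧ hitAt cs (m : Int) = true) := by
  induction fuel with
  | zero =>
    intro start hfuel hstart
    simp only [scanSlash, Bool.false_eq_true, false_iff]
    rintro ⟨m, h1, h2, -, -⟩; omega
  | succ fuel ih =>
    intro start hfuel hstart
    simp only [scanSlash]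
    set j := PySem.Chars.findFrom cs ['/'] (start : Int) none with hj
    by_cases hneg : j = -1
    · -- no slash at or after start
      have hno := (PySem.Chars.findFrom_natCast_eq_neg_one_iff cs ['/'] start hstart).mp hneg
      rw [if_pos hneg]
      simp only [Bool.false_eq_true, false_iff]
      rintro ⟨m, h1, h2, h3, -⟩
      apply hno
      have hpre : ['/'] <+: (cs.drop start).drop (m - start) := by
        rw [List.drop_drop]
        have e : start + (m - start) = m := by omega
        rw [e]
        exact (slash_prefix_iff cs m).mpr h3
      exact hpre.isInfix.trans (List.drop_suffix _ _).isInfix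
    · have hspec := PySem.Chars.findFrom_natCast_spec cs ['/'] start hstart hneg
      obtain ⟨hge, hpre, hmin⟩ := hspec
      have hj0 : 0 ≤ j := le_trans (by exact_mod_cast Int.natCast_nonneg start) hge
      have hslash : cs[j.toNat]? = some '/' := (slash_prefix_iff cs j.toNat).mp hpre
      have hjlt : j.toNat < cs.length := by
        by_contra hc
        rw [List.getElem?_eq_none (by omega)] at hslash; simp at hslash
      have hjcast : ((j.toNat : Nat) : Int) = j := Int.toNat_of_nonneg hj0
      have hgeN : start ≤ j.toNat := by rw [← hj] at hge; omega
      rw [if_neg hneg]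
      by_cases hhit : hitAt cs j = true
      · rw [if_pos hhit]
        simp only [true_iff]
        exact ⟨j.toNat, hgeN, hjlt, hslash, by rw [hjcast]; exact hhit⟩
      · rw [if_neg hhit]
        rw [ih (j.toNat + 1) (by omega) (by omega)]
        constructor
        · rintro ⟨m, h1, h2, h3, h4⟩
          exact ⟨m, by omega, h2, h3, h4⟩
        · rintro ⟨m, h1, h2, h3, h4⟩
          refine ⟨m, ?_, h2, h3, h4⟩
          rcases lt_trichotomy m j.toNat with hlt | heq | hgt
          · exact absurd ((slash_prefix_iff cs m).mpr h3) (hmin m h1 hlt)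
          · exfalso; apply hhit; rw [← hjcast, ← heq]; exact h4
          · omega

-- pointwise: A's window at i matches iff B's slash test at j = i + 2 matches
theorem win_hit (cs : List Char) (i : Nat) (h9 : i + 9 < cs.length) :
    winAt cs (i : Int) = true ↔
      (cs[i + 2]? = some '/' ∧ hitAt cs ((i : Int) + 2) = true) := by
  have hb : ((i : Int) + 2 + 7 < (cs.length : Int)) := by exact_mod_cast h9
  simp only [winAt, hitAt, digAt, slashAt, Bool.and_eq_true, decide_eq_true_iff]
  rw [show (i:Int)+2-2 = ((i:Nat):Int) from by ring,
      show (i:Int)+2-1 = ((i+1:Nat):Int) from by push_cast; ring,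
      show (i:Int)+2+1 = ((i+3:Nat):Int) from by push_cast; ring,
      show (i:Int)+2+2 = ((i+4:Nat):Int) from by push_cast; ring,
      show (i:Int)+2+3 = ((i+5:Nat):Int) from by push_cast; ring,
      show (i:Int)+2+4 = ((i+6:Nat):Int) from by push_cast; ring,
      show (i:Int)+2+5 = ((i+7:Nat):Int) from by push_cast; ring,
      show (i:Int)+2+6 = ((i+8:Nat):Int) from by push_cast; ring,
      show (i:Int)+2+7 = ((i+9:Nat):Int) from by push_cast; ring,
      show (i:Int)+1 = ((i+1:Nat):Int) from by push_cast; ring,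
      show (i:Int)+2 = ((i+2:Nat):Int) from by push_cast; ring,
      show (i:Int)+3 = ((i+3:Nat):Int) from by push_cast; ring,
      show (i:Int)+4 = ((i+4:Nat):Int) from by push_cast; ring,
      show (i:Int)+5 = ((i+5:Nat):Int) from by push_cast; ring,
      show (i:Int)+6 = ((i+6:Nat):Int) from by push_cast; ring,
      show (i:Int)+7 = ((i+7:Nat):Int) from by push_cast; ring,
      show (i:Int)+8 = ((i+8:Nat):Int) from by push_cast; ring,
      show (i:Int)+9 = ((i+9:Nat):Int) from by push_cast; ring]
  simp only [PySem.List.pyGet?_natCast, beq_iff_eq]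
  have hcast : ((i+9:Nat):Int) < (cs.length:Int) := by exact_mod_cast h9
  tauto

-- ===== VERDICT (by name: the statement is the Claim_ definition above) =====
theorem check_for_date_spec : Claim_equal_check_for_date := by
  intro comment _
  unfold Spec_check_for_date check_for_date check_for_date_alt
  by_cases hlen : comment.toList.length < 10
  · rw [if_pos hlen, if_pos hlen]
  · simp only [if_neg hlen]
    apply Bool.coe_iff_coe.mp
    rw [List.any_eq_true,
        scanSlash_iff comment.toList comment.toList.length 2 (by omega) (by omega)]
    constructor
    · rintro ⟨i, hmem, hwin⟩
      rw [PySem.List.mem_pyRange_one] at hmem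
      obtain ⟨h0, h1⟩ := hmem
      have hic : ((i.toNat : Nat) : Int) = i := Int.toNat_of_nonneg h0
      have h9 : i.toNat + 9 < comment.toList.length := by omega
      obtain ⟨hslash, hhit⟩ := (win_hit comment.toList i.toNat h9).mp (by rw [hic]; exact hwin)
      refine ⟨i.toNat + 2, by omega, by omega, hslash, ?_⟩
      have e : ((i.toNat + 2 : Nat) : Int) = ((i.toNat : Nat) : Int) + 2 := by push_cast; ring
      rw [e]; exact hhit
    · rintro ⟨m, hm2, hmlt, hslash, hhit⟩
      have hb : (m : Int) + 7 < (comment.toList.length : Int) := by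
        have h' := hhit
        unfold hitAt at h'
        simp only [Bool.and_eq_true, decide_eq_true_iff] at h'
        exact h'.1.1.1.1.1.1.1.1.1
      have hmn : m + 7 < comment.toList.length := by exact_mod_cast hb
      refine ⟨((m - 2 : Nat) : Int), ?_, ?_⟩
      · rw [PySem.List.mem_pyRange_one]
        constructor
        · exact_mod_cast Nat.zero_le _
        · have : (m - 2 : Nat) < comment.toList.length - 9 := by omega
          omega
      · have h9 : (m - 2) + 9 < comment.toList.length := by omega
        apply (win_hit comment.toList (m - 2) h9).mpr
        have e1 : m - 2 + 2 = m := by omega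
        have e2 : (((m - 2 : Nat)) : Int) + 2 = (m : Int) := by
          push_cast [Nat.cast_sub (by omega : 2 ≤ m)]; ring
        rw [e1, e2]
        exact ⟨hslash, hhit⟩
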